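-- pv_equiv track=rewrite | github.com/c2cad-bench/c2cad-bench | stages/phase4_bioinspired/generate_honeycomb.py | _hex_ring_coords
-- ===== SOURCE A (Python) =====
-- def _hex_ring_coords(ring):
--     """Return list of (q, r) axial coordinates for a hex ring of given radius.
--
--     Uses the standard ring-walk algorithm (Red Blob Games):
--       - Start at cube coord (0, -ring, +ring) → axial (0, -ring)
--       - Walk 6 edges, each edge has `ring` steps
--       - Directions (axial): (+1,0), (0,+1), (-1,+1), (-1,0), (0,-1), (+1,-1)
--     """
--     if ring == 0:
--         return [(0, 0)]
--     coords = []
--     directions = [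
--         (1, 0), (0, 1), (-1, 1),
--         (-1, 0), (0, -1), (1, -1)
--     ]
--     q, r = 0, -ring
--     for dq, dr in directions:
--         for _ in range(ring):
--             coords.append((q, r))
--             q += dq
--             r += dr
--     return coords
-- ===== SOURCE B (Python) =====
-- def _hex_ring_coords(ring):
--     """Same result as A: corner table first, each point computed directly from its corner."""
--     if ring == 0:
--         return [(0, 0)]
--     directions = [
--         (1, 0), (0, 1), (-1, 1),
--         (-1, 0), (0, -1), (1, -1)
--     ]
--     corners = [
--         (0, -ring), (ring, -ring), (ring, 0),
--         (0, ring), (-ring, ring), (-ring, 0)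
--     ]
--     return [
--         (cq + s * dq, cr + s * dr)
--         for (cq, cr), (dq, dr) in zip(corners, directions)
--         for s in range(ring)
--     ]
-- ===== Notes on version B (the rewrite author's own statement) =====
-- stated objective: alternative
-- what changed: Replaces the running (q,r) walk accumulator with a precomputed six-corner table; each point is computed directly as corner + step*direction via a zip comprehension.
import Mathlib
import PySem

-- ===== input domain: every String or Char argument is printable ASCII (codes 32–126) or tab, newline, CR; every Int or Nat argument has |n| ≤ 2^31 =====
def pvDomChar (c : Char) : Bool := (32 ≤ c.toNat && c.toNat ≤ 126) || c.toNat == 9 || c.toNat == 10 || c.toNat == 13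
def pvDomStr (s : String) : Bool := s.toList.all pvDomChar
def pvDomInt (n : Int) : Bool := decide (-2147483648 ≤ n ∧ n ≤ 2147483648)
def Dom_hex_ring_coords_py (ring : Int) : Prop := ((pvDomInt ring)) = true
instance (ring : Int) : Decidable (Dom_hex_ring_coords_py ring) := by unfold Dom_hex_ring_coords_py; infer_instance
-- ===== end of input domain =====

-- B replaces A's running (q,r) accumulator by a precomputed corner table, computing
-- each point directly as corner + step*direction (alternative decomposition, same cost).

-- ===== PORT A =====
-- literal port of A's ring walk: running (q,r) state, append into coords
def hex_ring_coords_py (ring : Int) : List (Int × Int) :=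
  if ring = 0 then [(0, 0)]
  else
    let directions : List (Int × Int) :=
      [(1, 0), (0, 1), (-1, 1), (-1, 0), (0, -1), (1, -1)]
    let st : List (Int × Int) × Int × Int :=
      directions.foldl (fun st d =>
        (PySem.List.pyRange 0 ring 1).foldl (fun st2 _ =>
          (st2.1 ++ [(st2.2.1, st2.2.2)], st2.2.1 + d.1, st2.2.2 + d.2)) st)
        ([], 0, -ring)
    st.1

-- ===== PORT B =====
-- literal port of Source B: corner table + zip double comprehension
def hex_ring_coords_py_alt (ring : Int) : List (Int × Int) :=
  if ring = 0 then [(0, 0)]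
  else
    let directions : List (Int × Int) :=
      [(1, 0), (0, 1), (-1, 1), (-1, 0), (0, -1), (1, -1)]
    let corners : List (Int × Int) :=
      [(0, -ring), (ring, -ring), (ring, 0), (0, ring), (-ring, ring), (-ring, 0)]
    (corners.zip directions).flatMap (fun cd =>
      (PySem.List.pyRange 0 ring 1).map (fun s =>
        (cd.1.1 + s * cd.2.1, cd.1.2 + s * cd.2.2)))

-- ===== PRECONDITION & SPEC =====
def Spec_hex_ring_coords_py (ring : Int) (out : List (Int × Int)) : Prop := out = hex_ring_coords_py_alt ring
instance (ring : Int) (out : List (Int × Int)) : Decidable (Spec_hex_ring_coords_py ring out) := by unfold Spec_hex_ring_coords_py; infer_instance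

-- ===== CLAIM (what is proved, stated in full; the proofs are below) =====
def Claim_equal_hex_ring_coords_py : Prop := ∀ (ring : Int), Dom_hex_ring_coords_py ring → Spec_hex_ring_coords_py ring (hex_ring_coords_py ring)

-- ===== LEMMAS AND PROOFS =====

-- one edge of A's walk: the inner foldl ignores the elements it iterates over, appends the
-- arithmetic progression and advances (q,r) by length steps of (dq,dr)
theorem pv_inner_edge {α : Type} (dq dr : Int) : ∀ (l : List α) (acc : List (Int × Int)) (q r : Int),
    l.foldl (fun (st2 : List (Int × Int) × Int × Int) _ =>
        (st2.1 ++ [(st2.2.1, st2.2.2)], st2.2.1 + dq, st2.2.2 + dr)) (acc, q, r)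
      = (acc ++ (List.range l.length).map (fun (s : Nat) => (q + (s : Int) * dq, r + (s : Int) * dr)),
         q + (l.length : Int) * dq, r + (l.length : Int) * dr) := by
  intro l
  induction l with
  | nil => intro acc q r; simp
  | cons x t ih =>
    intro acc q r
    simp only [List.foldl_cons, List.length_cons]
    rw [ih]
    simp only [Prod.mk.injEq]
    refine ⟨?_, ?_, ?_⟩
    · rw [List.range_succ_eq_map, List.map_cons, List.map_map, List.append_assoc,
        List.singleton_append]
      refine congrArg (acc ++ ·) ?_
      refine congrArg₂ (· :: ·) (by norm_num) ?_
      exact List.map_congr_left (fun a _ => by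
        simp only [Function.comp_apply, Nat.succ_eq_add_one, Prod.mk.injEq]
        push_cast
        constructor <;> ring)
    · push_cast; ring
    · push_cast; ring

theorem hex_eq (ring : Int) : hex_ring_coords_py ring = hex_ring_coords_py_alt ring := by
  by_cases h0 : ring = 0
  · simp [hex_ring_coords_py, hex_ring_coords_py_alt, h0]
  · have hr : PySem.List.pyRange 0 ring 1 = (List.range ring.toNat).map (fun (k : Nat) => (k : Int)) := by
      rw [PySem.List.pyRange_one 0 ring]
      norm_num
    simp only [hex_ring_coords_py, hex_ring_coords_py_alt, if_neg h0]
    simp only [List.foldl_cons, List.foldl_nil, List.zip_cons_cons, List.zip_nil_right,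
      List.flatMap_cons, List.flatMap_nil, List.append_nil]
    rw [hr]
    simp only [List.foldl_map, List.map_map]
    rw [pv_inner_edge, pv_inner_edge, pv_inner_edge, pv_inner_edge, pv_inner_edge, pv_inner_edge]
    simp only [List.length_range]
    by_cases hpos : 0 < ring
    · simp only [Int.toNat_of_nonneg hpos.le]
      simp only [List.append_assoc, List.nil_append]
      refine congrArg₂ (· ++ ·) ?_ (congrArg₂ (· ++ ·) ?_ (congrArg₂ (· ++ ·) ?_
        (congrArg₂ (· ++ ·) ?_ (congrArg₂ (· ++ ·) ?_ ?_))))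
      all_goals
        refine List.map_congr_left (fun a _ => ?_)
      all_goals
        simp only [Function.comp_apply, Prod.mk.injEq]
      all_goals
        constructor <;> ring
    · have hz : ring.toNat = 0 := by omega
      simp [hz]

-- ===== VERDICT (by name: the statement is the Claim_ definition above) =====
theorem hex_ring_coords_py_spec : Claim_equal_hex_ring_coords_py := by
  intro ring _
  exact hex_eq ring
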